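-- pv_equiv track=rewrite | github.com/Triptych-Labs/Solana-NFT-Loyalty-Rewards | src/airdrop.py | parse_opts
-- ===== SOURCE A (Python) =====
-- import typing
-- import getopt
--
-- def parse_opts(
--     opts, expected_opts
-- ) -> typing.Tuple[str, str, str, typing.List[str], int,]:
--     token_account, fee_payer, config, exclusions, reward = "", "", "", [], 0
--     if len(opts) <= expected_opts:
--         raise getopt.GetoptError(msg="Improper Options!!!")
--
--     for opt, val in opts:
--         if opt in ["--token-account", "-t"]:
--             token_account = val
--         if opt in ["--fee-payer", "-f"]:
--             fee_payer = val
--         if opt in ["--config", "-c"]: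
--             config = val
--         if opt in ["--exclude", "-e"]:
--             exclusions.append(val)
--         if opt in ["--reward", "-r"]:
--             reward = int(val)
--
--     return token_account, fee_payer, config, exclusions, reward
-- ===== SOURCE B (Python) =====
-- import typing
--
-- def parse_opts(
--     opts, expected_opts
-- ) -> typing.Tuple[str, str, str, typing.List[str], int,]:
--     if len(opts) <= expected_opts:
--         raise ValueError("Improper Options!!!")  # A raises GetoptError here; outside Pre_
--
--     def last(aliases, default):
--         # last occurrence wins, matching repeated assignment in a forward pass
--         return next((v for o, v in reversed(opts) if o in aliases), default)
--
--     token_account = last(("--token-account", "-t"), "")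
--     fee_payer = last(("--fee-payer", "-f"), "")
--     config = last(("--config", "-c"), "")
--     exclusions = [v for o, v in opts if o in ("--exclude", "-e")]
--     reward = int(last(("--reward", "-r"), "0"))
--     return token_account, fee_payer, config, exclusions, reward
-- ===== Notes on version B (the rewrite author's own statement) =====
-- stated objective: alternative
-- what changed: Replaces the single forward accumulating pass with five branch-free declarative queries: each scalar field is the last matching value found by a reversed-scan-with-early-exit, and exclusions is a filter comprehension; the int conversion happens once on the final reward value instead of per occurrence.
-- outside the precondition, e.g. on parse_opts([('-r', 'x')], 0): A raises ValueError, B raises ValueError; on parse_opts([], 0): A raises GetoptError, B raises ValueError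
import Mathlib
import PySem

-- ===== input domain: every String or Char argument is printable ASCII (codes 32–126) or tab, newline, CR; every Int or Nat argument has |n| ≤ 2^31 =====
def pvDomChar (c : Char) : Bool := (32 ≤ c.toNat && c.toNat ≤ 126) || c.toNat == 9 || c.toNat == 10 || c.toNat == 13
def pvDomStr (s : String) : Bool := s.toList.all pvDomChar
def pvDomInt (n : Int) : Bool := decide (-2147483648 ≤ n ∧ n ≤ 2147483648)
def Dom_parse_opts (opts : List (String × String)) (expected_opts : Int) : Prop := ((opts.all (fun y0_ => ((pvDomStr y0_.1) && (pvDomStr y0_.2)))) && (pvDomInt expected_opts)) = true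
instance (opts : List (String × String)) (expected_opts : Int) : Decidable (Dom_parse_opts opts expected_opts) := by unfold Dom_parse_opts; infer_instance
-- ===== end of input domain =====

-- B replaces A's single accumulating pass by five independent declarative
-- queries (last-match reversed scans and a filter); objective: alternative.

-- ===== PORT A =====
-- A's loop body: five independent if-tests updating the accumulator.
-- int(val) raises ValueError when PySem.Int.ofStr? is none — those inputs are
-- excluded by Pre_parse_opts; the port uses getD 0 there (unreached inside Pre_).
def pvStepA (st : String × String × String × List String × Int) (p : String × String) :
    String × String × String × List String × Int :=
  ( if p.1 ∈ ["--token-account", "-t"] then p.2 else st.1,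
    if p.1 ∈ ["--fee-payer", "-f"] then p.2 else st.2.1,
    if p.1 ∈ ["--config", "-c"] then p.2 else st.2.2.1,
    if p.1 ∈ ["--exclude", "-e"] then st.2.2.2.1 ++ [p.2] else st.2.2.2.1,
    if p.1 ∈ ["--reward", "-r"] then (PySem.Int.ofStr? p.2).getD 0 else st.2.2.2.2 )

-- the 'len(opts) <= expected_opts' guard raises GetoptError; Pre_ excludes it
def parse_opts (opts : List (String × String)) (expected_opts : Int) :
    String × String × String × List String × Int :=
  opts.foldl pvStepA ("", "", "", [], 0)

-- ===== PORT B =====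
-- next((v for o, v in reversed(opts) if o in aliases), default)
def pvLastVal (opts : List (String × String)) (aliases : List String) (default : String) : String :=
  ((opts.reverse.find? (fun p => p.1 ∈ aliases)).map (fun p => p.2)).getD default

def parse_opts_alt (opts : List (String × String)) (expected_opts : Int) :
    String × String × String × List String × Int :=
  ( pvLastVal opts ["--token-account", "-t"] "",
    pvLastVal opts ["--fee-payer", "-f"] "",
    pvLastVal opts ["--config", "-c"] "",
    (opts.filter (fun p => p.1 ∈ ["--exclude", "-e"])).map (fun p => p.2),
    (PySem.Int.ofStr? (pvLastVal opts ["--reward", "-r"] "0")).getD 0 )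

-- ===== PRECONDITION & SPEC =====
-- Pre_ excludes exactly the inputs where A raises: len(opts) <= expected_opts
-- (GetoptError) and any reward option whose value int() rejects (ValueError).
def Pre_parse_opts (opts : List (String × String)) (expected_opts : Int) : Prop :=
  expected_opts < (opts.length : Int) ∧
    ∀ p ∈ opts, p.1 ∈ ["--reward", "-r"] → (PySem.Int.ofStr? p.2).isSome = true
instance (opts : List (String × String)) (expected_opts : Int) : Decidable (Pre_parse_opts opts expected_opts) := by unfold Pre_parse_opts; infer_instance

def pvWitness_parse_opts : (List (String × String)) × Int :=
  ([("-t", "tok"), ("--reward", "7"), ("-e", "x")], 1)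

def Spec_parse_opts (opts : List (String × String)) (expected_opts : Int) (out : String × String × String × List String × Int) : Prop := out = parse_opts_alt opts expected_opts
instance (opts : List (String × String)) (expected_opts : Int) (out : String × String × String × List String × Int) : Decidable (Spec_parse_opts opts expected_opts out) := by unfold Spec_parse_opts; infer_instance

-- ===== CLAIM (what is proved, stated in full; the proofs are below) =====
def Claim_equal_parse_opts : Prop := ∀ (opts : List (String × String)) (expected_opts : Int), Dom_parse_opts opts expected_opts → Pre_parse_opts opts expected_opts → Spec_parse_opts opts expected_opts (parse_opts opts expected_opts)

-- ===== LEMMAS AND PROOFS =====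

theorem pvLastVal_cons (x : String × String) (xs : List (String × String))
    (al : List String) (d : String) :
    pvLastVal (x :: xs) al d = pvLastVal xs al (if x.1 ∈ al then x.2 else d) := by
  simp only [pvLastVal, List.reverse_cons, List.find?_append]
  cases h : xs.reverse.find? (fun p => p.1 ∈ al) with
  | some p => simp
  | none => by_cases hx : x.1 ∈ al <;> simp [List.find?, hx]

theorem pvFoldA_char (opts : List (String × String))
    (st : String × String × String × List String × Int) :
    opts.foldl pvStepA st =
      ( pvLastVal opts ["--token-account", "-t"] st.1,
        pvLastVal opts ["--fee-payer", "-f"] st.2.1,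
        pvLastVal opts ["--config", "-c"] st.2.2.1,
        st.2.2.2.1 ++ (opts.filter (fun p => p.1 ∈ ["--exclude", "-e"])).map (fun p => p.2),
        (((opts.reverse.find? (fun p => p.1 ∈ ["--reward", "-r"])).map
            (fun p => (PySem.Int.ofStr? p.2).getD 0)).getD st.2.2.2.2) ) := by
  induction opts generalizing st with
  | nil => simp [pvLastVal]
  | cons x xs ih =>
      simp only [List.foldl_cons, ih, pvLastVal_cons, pvStepA,
        List.reverse_cons, List.find?_append, List.filter_cons]
      by_cases hr : x.1 ∈ ["--reward", "-r"] <;>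
        by_cases he : x.1 ∈ ["--exclude", "-e"] <;>
        cases h : xs.reverse.find? (fun p => p.1 ∈ ["--reward", "-r"]) <;>
          simp [List.find?, hr, he]

-- ===== VERDICT (by name: the statement is the Claim_ definition above) =====
theorem parse_opts_spec : Claim_equal_parse_opts := by
  intro opts expected_opts _ _
  show parse_opts opts expected_opts = parse_opts_alt opts expected_opts
  rw [parse_opts, parse_opts_alt, pvFoldA_char]
  simp only [pvLastVal, List.nil_append, Prod.mk.injEq]
  refine ⟨trivial, trivial, trivial, trivial, ?_⟩
  cases h : opts.reverse.find? (fun p => p.1 ∈ ["--reward", "-r"]) with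
  | none => decide
  | some p => rfl
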